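-- pv_equiv track=rewrite | github.com/miliar/Code_Jam_Webscraper | solutions_python/Problem_181/1166.py | solve
-- ===== SOURCE A (Python) =====
-- def solve(string):
--     if string[-1] == '\n':
--         string = string[:-1]
--     result = string[0]
--     for l in string[1:]:
--         if l < result[0]:
--             result = result + l
--         else:
--             result = l + result
--     return result
-- ===== SOURCE B (Python) =====
-- def solve(string):
--     if string[-1] == '\n':
--         string = string[:-1]
--     m = string[0]
--     pm = []
--     for c in string:
--         if c > m:
--             m = c
--         pm.append(m)
--     front = [c for c, p in zip(string, pm) if c == p]
--     rest = [c for c, p in zip(string, pm) if c != p]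
--     return ''.join(front[::-1]) + ''.join(rest)
-- ===== Notes on version B (the rewrite author's own statement) =====
-- stated objective: faster
-- what changed: B replaces A's stateful scan that grows one result string by prepending/appending against its current first character with three staged passes: build a prefix-maximum array, partition the characters by the closed condition 'char equals its prefix maximum' (front vs rest), and return the reversed front list joined with the rest list.
import Mathlib
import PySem

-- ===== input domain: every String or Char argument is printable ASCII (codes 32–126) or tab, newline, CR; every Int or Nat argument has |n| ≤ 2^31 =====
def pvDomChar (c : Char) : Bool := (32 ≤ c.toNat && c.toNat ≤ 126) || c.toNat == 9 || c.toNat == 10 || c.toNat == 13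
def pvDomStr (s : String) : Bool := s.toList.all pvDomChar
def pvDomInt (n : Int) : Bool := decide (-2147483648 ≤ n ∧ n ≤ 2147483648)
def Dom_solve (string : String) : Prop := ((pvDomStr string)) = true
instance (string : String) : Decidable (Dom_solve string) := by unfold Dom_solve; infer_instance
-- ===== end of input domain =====

-- B stages the work: a prefix-maximum array, a partition by the closed condition
-- "char equals its prefix maximum", then reversed front part plus rest — instead of A's
-- stateful prepend/append scan of one growing string; return value only (nothing is mutated).

-- ===== PORT A =====
-- result[0] is read with headD: result is nonempty throughout Python's loop, so the
-- default is never the value Python reads.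
def solveStepA (result : List Char) (l : Char) : List Char :=
  if l < result.headD ' ' then result ++ [l] else l :: result

def solve (string : String) : String :=
  let cs := string.toList
  let cs := if PySem.List.pyGet? cs (-1) = some '\n' then PySem.List.slice cs none (some (-1)) else cs
  -- result = string[0]: cs.take 1; Pre_ excludes the empty case, where Python raises IndexError
  String.ofList ((PySem.List.slice cs (some 1) none).foldl solveStepA (cs.take 1))

-- ===== PORT B =====
-- the body of B's first loop: 'if c > m: m = c' then 'pm.append(m)'
def pmStep (st : Char × List Char) (c : Char) : Char × List Char :=
  if st.1 < c then (c, st.2 ++ [c]) else (st.1, st.2 ++ [st.1])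

def solve_alt (string : String) : String :=
  let cs := string.toList
  let cs := if PySem.List.pyGet? cs (-1) = some '\n' then PySem.List.slice cs none (some (-1)) else cs
  match cs with
  | [] => ""   -- unreachable under Pre_: Python B raises IndexError at string[0] here
  | c0 :: _ =>
    let pm := (cs.foldl pmStep (c0, [])).2
    let front := ((cs.zip pm).filter (fun p => p.1 == p.2)).map (·.1)
    let rest := ((cs.zip pm).filter (fun p => p.1 != p.2)).map (·.1)
    String.ofList (front.reverse ++ rest)

-- ===== PRECONDITION & SPEC =====
-- Pre_ excludes exactly the inputs where Python A raises IndexError: the empty string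
-- (at string[-1]) and "\n" (at string[0] after the strip); B raises IndexError there too.
def Pre_solve (string : String) : Prop := string.toList ≠ [] ∧ string.toList ≠ ['\n']
instance (string : String) : Decidable (Pre_solve string) := by unfold Pre_solve; infer_instance
def pvWitness_solve : String := "ba\n"

def Spec_solve (string : String) (out : String) : Prop := out = solve_alt string
instance (string : String) (out : String) : Decidable (Spec_solve string out) := by unfold Spec_solve; infer_instance

-- ===== CLAIM (what is proved, stated in full; the proofs are below) =====
def Claim_equal_solve : Prop := ∀ (string : String), Dom_solve string → Pre_solve string → Spec_solve string (solve string)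

-- ===== LEMMAS AND PROOFS =====

-- the prefix-maximum list B's first loop computes, as a structural recursion
def pmList (m : Char) : List Char → List Char
  | [] => []
  | c :: t => max m c :: pmList (max m c) t

lemma length_pmList (t : List Char) : ∀ m : Char, (pmList m t).length = t.length := by
  induction t with
  | nil => intro m; rfl
  | cons c t ih => intro m; simp [pmList, ih]

-- B's first loop computes the running maximum and the prefix-maximum list
lemma fold_pm (cs : List Char) : ∀ (m : Char) (acc : List Char),
    cs.foldl pmStep (m, acc) = (cs.foldl (fun a c => max a c) m, acc ++ pmList m cs) := by
  induction cs with
  | nil => intro m acc; simp [pmList]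
  | cons c t ih =>
    intro m acc
    have hstep : pmStep (m, acc) c = (max m c, acc ++ [max m c]) := by
      unfold pmStep
      by_cases h : m < c
      · rw [if_pos h, max_eq_right (le_of_lt h)]
      · rw [if_neg h, max_eq_left (le_of_not_gt h)]
    simp [List.foldl_cons, hstep, ih, pmList]

lemma pmList_append (t : List Char) : ∀ (m c : Char),
    pmList m (t ++ [c]) = pmList m t ++ [max (t.foldl (fun a c => max a c) m) c] := by
  induction t with
  | nil => intro m c; simp [pmList]
  | cons x t ih => intro m c; simp [pmList, List.foldl_cons, ih]

-- the head of A's accumulator is the running maximum of the characters seen so far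
lemma headA : ∀ (t acc : List Char) (m : Char), acc.head? = some m →
    (t.foldl solveStepA acc).head? = some (t.foldl (fun a c => max a c) m) := by
  intro t
  induction t with
  | nil => intro acc m h; simpa using h
  | cons c t ih =>
    intro acc m h
    have hD : acc.headD ' ' = m := by simp [List.headD_eq_head?_getD, h]
    simp only [List.foldl_cons, solveStepA, hD]
    by_cases hc : c < m
    · rw [if_pos hc, max_eq_left (le_of_lt hc)]
      exact ih (acc ++ [c]) m (by rw [List.head?_append, h]; rfl)
    · rw [if_neg hc, max_eq_right (le_of_not_gt hc)]
      exact ih (c :: acc) c rfl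

-- main invariant: A's result is the reversed front partition followed by the rest partition
lemma mainEq (c0 : Char) : ∀ (t : List Char),
    t.foldl solveStepA [c0]
      = ((((c0 :: t).zip (c0 :: pmList c0 t)).filter (fun p => p.1 == p.2)).map (·.1)).reverse
        ++ (((c0 :: t).zip (c0 :: pmList c0 t)).filter (fun p => p.1 != p.2)).map (·.1) := by
  intro t
  induction t using List.reverseRecOn with
  | nil => simp [pmList, List.zip, List.filter]
  | append_singleton t c ih =>
    set M := t.foldl (fun a c => max a c) c0 with hM
    have hzip : (c0 :: (t ++ [c])).zip (c0 :: pmList c0 (t ++ [c]))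
        = (c0 :: t).zip (c0 :: pmList c0 t) ++ [(c, max M c)] := by
      rw [pmList_append, ← hM,
        show c0 :: (t ++ [c]) = (c0 :: t) ++ [c] by simp,
        show c0 :: (pmList c0 t ++ [max M c]) = (c0 :: pmList c0 t) ++ [max M c] by simp,
        List.zip_append (by simp [length_pmList])]
      rfl
    have hhead : (t.foldl solveStepA [c0]).head? = some M := headA t [c0] c0 (by simp)
    rw [List.foldl_append, List.foldl_cons, List.foldl_nil, hzip,
      List.filter_append, List.filter_append, List.map_append, List.map_append]
    set A' := t.foldl solveStepA [c0] with hA'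
    have hD : A'.headD ' ' = M := by simp [List.headD_eq_head?_getD, hhead]
    simp only [solveStepA, hD]
    by_cases hc : c < M
    · have hne : ¬ (c = max M c) := by
        rw [max_eq_left (le_of_lt hc)]; exact ne_of_lt hc
      have hb : (c == max M c) = false := by simp [hne]
      have hb2 : (c != max M c) = true := by simp [bne, hb]
      rw [if_pos hc, ih]
      simp [List.filter, hb, hb2]
    · have heq : c = max M c := (max_eq_right (le_of_not_gt hc)).symm
      have hb : (c == max M c) = true := by simp [← heq]
      have hb2 : (c != max M c) = false := by simp [bne, hb]
      rw [if_neg hc, ih]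
      simp [List.filter, hb, hb2]

-- ===== VERDICT (by name: the statement is the Claim_ definition above) =====
theorem solve_spec : Claim_equal_solve := by
  intro string _ hpre
  unfold Spec_solve solve solve_alt
  simp only
  by_cases hnl : PySem.List.pyGet? string.toList (-1) = some '\n'
  · simp only [hnl, if_true, PySem.List.slice_to_neg_one]
    have hlast : string.toList.getLast? = some '\n' := by
      rw [← PySem.List.pyGet?_neg_one]; exact hnl
    have hne : string.toList.dropLast ≠ [] := by
      rcases h : string.toList with _ | ⟨a, t⟩
      · rw [h] at hlast; simp at hlast
      · rcases t with _ | ⟨b, t2⟩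
        · rw [h] at hlast; simp at hlast
          exact absurd (by rw [h, hlast]) hpre.2
        · simp
    rcases h : string.toList.dropLast with _ | ⟨c0, t⟩
    · exact absurd h hne
    · simp only [List.take_succ_cons, List.take_zero, PySem.List.slice_from_one, List.tail_cons,
        fold_pm, List.nil_append, pmList, max_self]
      exact congrArg String.ofList (mainEq c0 t)
  · simp only [hnl, if_false]
    rcases h : string.toList with _ | ⟨c0, t⟩
    · exact absurd h hpre.1
    · simp only [List.take_succ_cons, List.take_zero, PySem.List.slice_from_one, List.tail_cons,
        fold_pm, List.nil_append, pmList, max_self]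
      exact congrArg String.ofList (mainEq c0 t)
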